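-- pv_equiv track=rewrite | github.com/thaibahung/ML_Project | models/dualist_base.py | motion_blur_frame
-- ===== SOURCE A (Python) =====
-- def motion_blur_frame(frame, blur_radius):
--     blurred_frame = []
--     for row in frame:
--         blurred_row = []
--         for i in range(len(row)):
--             neighbors = row[max(0, i - blur_radius):min(len(row), i + blur_radius + 1)]
--             blurred_row.append(sum(neighbors) // len(neighbors))
--         blurred_frame.append(blurred_row)
--     return blurred_frame
-- ===== SOURCE B (Python) =====
-- def motion_blur_frame(frame, blur_radius):
--     # One prefix-sum pass per row, then O(1) window sum per pixel.
--     out = []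
--     for row in frame:
--         n = len(row)
--         prefix = [0]
--         for v in row:
--             prefix.append(prefix[-1] + v)
--         blurred = []
--         for i in range(n):
--             lo = max(0, i - blur_radius)
--             hi = min(n, i + blur_radius + 1)
--             blurred.append((prefix[hi] - prefix[lo]) // (hi - lo))
--         blurred_frame_row = blurred
--         out.append(blurred_frame_row)
--     return out
-- ===== Notes on version B (the rewrite author's own statement) =====
-- stated objective: faster
-- what changed: replaces the per-pixel slice-and-sum (O(blur_radius) work per pixel) by one prefix-sum pass per row with O(1) window sums
import Mathlib
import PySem

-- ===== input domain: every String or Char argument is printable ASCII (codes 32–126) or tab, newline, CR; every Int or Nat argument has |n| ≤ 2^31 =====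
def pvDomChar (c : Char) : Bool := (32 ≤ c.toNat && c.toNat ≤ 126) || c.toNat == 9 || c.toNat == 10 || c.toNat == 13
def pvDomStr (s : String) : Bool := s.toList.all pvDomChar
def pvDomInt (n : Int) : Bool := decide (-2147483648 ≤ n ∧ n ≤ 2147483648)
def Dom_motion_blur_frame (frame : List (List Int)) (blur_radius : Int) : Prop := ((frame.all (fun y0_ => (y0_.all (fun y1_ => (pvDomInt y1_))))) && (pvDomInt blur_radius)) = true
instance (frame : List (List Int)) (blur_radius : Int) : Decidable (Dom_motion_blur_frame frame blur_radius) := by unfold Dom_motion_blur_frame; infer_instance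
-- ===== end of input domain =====

-- B replaces the per-pixel slice-and-sum by one prefix-sum pass per row (O(1) window sum per pixel): asymptotically faster.

-- ===== PORT A =====
def motion_blur_frame (frame : List (List Int)) (blur_radius : Int) : List (List Int) :=
  frame.map (fun row =>
    (List.range row.length).map (fun (i : Nat) =>
      let neighbors := PySem.List.slice row (some (max 0 ((i : Int) - blur_radius)))
                          (some (min (row.length : Int) ((i : Int) + blur_radius + 1)))
      PySem.Int.floordiv neighbors.sum (neighbors.length : Int)))

-- ===== PORT B =====
-- the Python prefix loop: prefix starts as [0]; each step appends prefix[-1] + v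
def pfxLoop (pfx : List Int) (row : List Int) : List Int :=
  match row with
  | [] => pfx
  | v :: t => pfxLoop (pfx ++ [(pfx.getLast?.getD 0) + v]) t

def motion_blur_frame_alt (frame : List (List Int)) (blur_radius : Int) : List (List Int) :=
  frame.map (fun row =>
    let n : Int := (row.length : Int)
    let pfx := pfxLoop [0] row
    (List.range row.length).map (fun (i : Nat) =>
      let lo := max 0 ((i : Int) - blur_radius)
      let hi := min n ((i : Int) + blur_radius + 1)
      -- prefix[hi] / prefix[lo]: in-range Python indexing; .getD 0 is exact on Pre_
      PySem.Int.floordiv (((PySem.List.pyGet? pfx hi).getD 0) - ((PySem.List.pyGet? pfx lo).getD 0)) (hi - lo)))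

-- ===== PRECONDITION & SPEC =====
-- Pre_ excludes exactly the inputs where A raises ZeroDivisionError: a negative blur_radius
-- makes every neighbour slice empty, so any nonempty row divides by zero.
def Pre_motion_blur_frame (frame : List (List Int)) (blur_radius : Int) : Prop :=
  0 ≤ blur_radius ∨ frame.all (fun row => row.isEmpty) = true
instance (frame : List (List Int)) (blur_radius : Int) : Decidable (Pre_motion_blur_frame frame blur_radius) := by unfold Pre_motion_blur_frame; infer_instance
def pvWitness_motion_blur_frame : List (List Int) × Int := ([[1, 2, 3, 10], [0, -4]], 1)

def Spec_motion_blur_frame (frame : List (List Int)) (blur_radius : Int) (out : List (List Int)) : Prop := out = motion_blur_frame_alt frame blur_radius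
instance (frame : List (List Int)) (blur_radius : Int) (out : List (List Int)) : Decidable (Spec_motion_blur_frame frame blur_radius out) := by unfold Spec_motion_blur_frame; infer_instance

-- ===== CLAIM (what is proved, stated in full; the proofs are below) =====
def Claim_equal_motion_blur_frame : Prop := ∀ (frame : List (List Int)) (blur_radius : Int), Dom_motion_blur_frame frame blur_radius → Pre_motion_blur_frame frame blur_radius → Spec_motion_blur_frame frame blur_radius (motion_blur_frame frame blur_radius)

-- ===== LEMMAS AND PROOFS =====

-- pure running-sum tail used to characterise pfxLoop
def scanTail (s : Int) (row : List Int) : List Int :=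
  match row with
  | [] => []
  | v :: t => (s + v) :: scanTail (s + v) t

theorem pfxLoop_eq (row : List Int) : ∀ (pfx : List Int), pfx ≠ [] →
    pfxLoop pfx row = pfx ++ scanTail (pfx.getLast?.getD 0) row := by
  induction row with
  | nil => intro pfx h; simp [pfxLoop, scanTail]
  | cons v t ih =>
    intro pfx h
    have hne : pfx ++ [pfx.getLast?.getD 0 + v] ≠ [] := by simp
    rw [pfxLoop, ih _ hne]
    have : (pfx ++ [pfx.getLast?.getD 0 + v]).getLast?.getD 0 = pfx.getLast?.getD 0 + v := by
      simp [List.getLast?_append]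
    rw [this]
    simp [scanTail]

theorem scanTail_get (row : List Int) : ∀ (s : Int) (k : Nat), k < row.length →
    (scanTail s row)[k]? = some (s + (row.take (k + 1)).sum) := by
  induction row with
  | nil => intro s k h; simp at h
  | cons v t ih =>
    intro s k h
    cases k with
    | zero => simp [scanTail]
    | succ j =>
      have hj : j < t.length := by simpa using h
      simp [scanTail, ih (s + v) j hj, add_assoc]

theorem prefix_get (row : List Int) (k : Nat) (hk : k ≤ row.length) :
    (pfxLoop [0] row)[k]? = some ((row.take k).sum) := by
  rw [pfxLoop_eq row [0] (by simp)]
  cases k with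
  | zero => simp
  | succ j =>
    have hj : j < row.length := by omega
    have : ([(0 : Int)] ++ scanTail (([(0:Int)].getLast?.getD 0)) row)[j + 1]? =
        (scanTail 0 row)[j]? := by simp
    rw [this, scanTail_get row 0 j hj]
    simp

theorem sum_drop_take (row : List Int) (a b : Nat) (hab : a ≤ b) :
    ((row.drop a).take (b - a)).sum = (row.take b).sum - (row.take a).sum := by
  have : row.take b = row.take a ++ (row.drop a).take (b - a) := by
    rw [← List.take_add]
    congr 1
    omega
  rw [this, List.sum_append]
  ring

-- the per-pixel agreement, for a nonnegative radius
theorem cell_eq (row : List Int) (blur_radius : Int) (hr : 0 ≤ blur_radius)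
    (i : Nat) (hi : i < row.length) :
    (let neighbors := PySem.List.slice row (some (max 0 ((i : Int) - blur_radius)))
        (some (min (row.length : Int) ((i : Int) + blur_radius + 1)))
     PySem.Int.floordiv neighbors.sum (neighbors.length : Int)) =
    (let lo := max 0 ((i : Int) - blur_radius)
     let hi' := min (row.length : Int) ((i : Int) + blur_radius + 1)
     PySem.Int.floordiv (((PySem.List.pyGet? (pfxLoop [0] row) hi').getD 0)
        - ((PySem.List.pyGet? (pfxLoop [0] row) lo).getD 0)) (hi' - lo)) := by
  simp only []
  set lo : Int := max 0 ((i : Int) - blur_radius) with hlo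
  set hi' : Int := min (row.length : Int) ((i : Int) + blur_radius + 1) with hhi
  have h0lo : 0 ≤ lo := le_max_left _ _
  have h0hi : 0 ≤ hi' := by
    have : (0 : Int) ≤ (i : Int) + blur_radius + 1 := by positivity
    omega
  have hlohi : lo ≤ hi' := by
    have h1 : (i : Int) < (row.length : Int) := by exact_mod_cast hi
    omega
  have hhin : hi' ≤ (row.length : Int) := min_le_left _ _
  -- Nat versions
  set a : Nat := lo.toNat with ha
  set b : Nat := hi'.toNat with hb
  have hab : a ≤ b := by omega
  have hbn : b ≤ row.length := by omega
  have hslice : PySem.List.slice row (some lo) (some hi') = (row.drop a).take (b - a) :=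
    PySem.List.slice_toNat row h0lo h0hi
  have hlen : ((row.drop a).take (b - a)).length = b - a := by
    simp [List.length_take, List.length_drop]
    omega
  have hga : PySem.List.pyGet? (pfxLoop [0] row) lo = some ((row.take a).sum) := by
    have : lo = ((a : Nat) : Int) := by omega
    rw [this, PySem.List.pyGet?_natCast]
    exact prefix_get row a (le_trans hab hbn)
  have hgb : PySem.List.pyGet? (pfxLoop [0] row) hi' = some ((row.take b).sum) := by
    have : hi' = ((b : Nat) : Int) := by omega
    rw [this, PySem.List.pyGet?_natCast]
    exact prefix_get row b hbn
  rw [hslice, hga, hgb]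
  simp only [Option.getD_some]
  rw [sum_drop_take row a b hab, hlen]
  congr 1
  omega

theorem row_eq (row : List Int) (blur_radius : Int)
    (h : 0 ≤ blur_radius ∨ row = []) :
    (List.range row.length).map (fun (i : Nat) =>
      let neighbors := PySem.List.slice row (some (max 0 ((i : Int) - blur_radius)))
          (some (min (row.length : Int) ((i : Int) + blur_radius + 1)))
      PySem.Int.floordiv neighbors.sum (neighbors.length : Int)) =
    (List.range row.length).map (fun (i : Nat) =>
      let lo := max 0 ((i : Int) - blur_radius)
      let hi := min ((row.length : Int)) ((i : Int) + blur_radius + 1)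
      PySem.Int.floordiv (((PySem.List.pyGet? (pfxLoop [0] row) hi).getD 0)
        - ((PySem.List.pyGet? (pfxLoop [0] row) lo).getD 0)) (hi - lo)) := by
  rcases h with hr | hnil
  · apply List.map_congr_left
    intro i hi
    have hi' : i < row.length := List.mem_range.mp hi
    exact cell_eq row blur_radius hr i hi'
  · subst hnil; simp

-- ===== VERDICT (by name: the statement is the Claim_ definition above) =====
theorem motion_blur_frame_spec : Claim_equal_motion_blur_frame := by
  intro frame blur_radius _ hpre
  unfold Spec_motion_blur_frame motion_blur_frame motion_blur_frame_alt
  apply List.map_congr_left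
  intro row hrow
  have h : 0 ≤ blur_radius ∨ row = [] := by
    rcases hpre with h | h
    · exact Or.inl h
    · right
      have := List.all_eq_true.mp h row hrow
      simpa [List.isEmpty_iff] using this
  simpa using row_eq row blur_radius h
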